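-- pv_equiv track=rewrite | github.com/vlaxcs/FMI-1LINFO-PA-SEM6HW | Autostrada/autostrada.py | sectors
-- ===== SOURCE A (Python) =====
-- def sectors(sec, rl):
--     damagedSectors = []
--     safeSectors = []
--     minr = sec[0][0]
--     maxr = sec[0][1]
--     length = 0
--     last = 0
--
--     for i in range(1, len(sec)):
--         if sec[i][1] <= maxr:
--             continue
--         elif sec[i][0] <= maxr:
--             maxr = sec[i][1]
--         else:
--             length += maxr - minr
--             safeSectors.append((last, minr))
--             damagedSectors.append((minr, maxr))
--             last = maxr
--             minr = sec[i][0]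
--             maxr = sec[i][1]
--
--     length += maxr - minr
--     safeSectors.append((last, minr))
--     damagedSectors.append((minr, maxr))
--
--     if (safeSectors[-1][1] != rl):
--         safeSectors.append((maxr, rl))
--
--     return length, damagedSectors, safeSectors
-- ===== SOURCE B (Python) =====
-- def sectors(sec, rl):
--     # Defunctionalized recursion: the forward phase builds NO output, it only
--     # pushes a close-frame (prev_end, lo, hi) per finished damaged block; the
--     # base case seeds the result from the final open block (deciding the rl
--     # tail rule there, by lo != rl); the unwind pops frames right-to-left,
--     # assembling length/damaged/safe back-to-front, reversed once at the end.
--     stack = []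
--     lo, hi = sec[0]
--     prev = 0
--     for s, e in sec[1:]:
--         if e <= hi:
--             continue
--         if s <= hi:
--             hi = e
--         else:
--             stack.append((prev, lo, hi))
--             prev, lo, hi = hi, s, e
--     length = hi - lo
--     damaged_rev = [(lo, hi)]
--     safe_rev = [(hi, rl), (prev, lo)] if lo != rl else [(prev, lo)]
--     while stack:
--         prev, lo, hi = stack.pop()
--         length += hi - lo
--         damaged_rev.append((lo, hi))
--         safe_rev.append((prev, lo))
--     return length, damaged_rev[::-1], safe_rev[::-1]
-- ===== Notes on version B (the rewrite author's own statement) =====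
-- stated objective: alternative
-- what changed: A's single loop that appends to the damaged/safe lists and accumulates the length as it scans is replaced by a defunctionalized recursion: a forward phase that only pushes close-frames (prev_end, lo, hi) on a stack, a base case that seeds the result from the final open block and decides the rl tail rule there, and an unwind that pops frames right-to-left building all three outputs back-to-front (reversed once at the end).
import Mathlib
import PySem

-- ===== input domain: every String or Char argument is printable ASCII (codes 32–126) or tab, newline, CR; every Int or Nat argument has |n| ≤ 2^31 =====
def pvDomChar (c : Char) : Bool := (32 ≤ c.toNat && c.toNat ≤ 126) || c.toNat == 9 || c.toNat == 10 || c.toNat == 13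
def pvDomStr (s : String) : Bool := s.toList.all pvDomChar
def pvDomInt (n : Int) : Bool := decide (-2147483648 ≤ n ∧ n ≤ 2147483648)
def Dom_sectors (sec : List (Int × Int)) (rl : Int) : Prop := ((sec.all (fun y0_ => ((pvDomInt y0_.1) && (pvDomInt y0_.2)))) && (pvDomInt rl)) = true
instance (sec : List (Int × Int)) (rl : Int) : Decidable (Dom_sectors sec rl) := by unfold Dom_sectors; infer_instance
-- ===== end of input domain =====

-- B replaces A's output-appending scan by a defunctionalized recursion: a stack of
-- close-frames, a base case deciding the rl tail rule, and a back-to-front unwind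
-- (objective: alternative — same O(n) cost, different construction).

-- ===== PORT A =====
-- loop state: (damagedSectors, safeSectors, minr, maxr, length, last)
def sectorsStepA (st : List (Int × Int) × List (Int × Int) × Int × Int × Int × Int)
    (x : Int × Int) : List (Int × Int) × List (Int × Int) × Int × Int × Int × Int :=
  let (dam, safe, minr, maxr, length, last) := st
  if x.2 ≤ maxr then st
  else if x.1 ≤ maxr then (dam, safe, minr, x.2, length, last)
  else (dam ++ [(minr, maxr)], safe ++ [(last, minr)], x.1, x.2, length + maxr - minr, maxr)

def sectors (sec : List (Int × Int)) (rl : Int) : Int × (List (Int × Int)) × (List (Int × Int)) :=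
  -- Pre_sectors guarantees sec ≠ [], so the pyGetD defaults are never used (sec[0] would raise on [])
  let minr := (PySem.List.pyGetD sec 0 ((0:Int), (0:Int))).1
  let maxr := (PySem.List.pyGetD sec 0 ((0:Int), (0:Int))).2
  let st := (PySem.List.pyRange 1 (PySem.List.len sec) 1).foldl
      (fun st i => sectorsStepA st (PySem.List.pyGetD sec i ((0:Int), (0:Int))))
      ([], [], minr, maxr, 0, 0)
  let (dam, safe, minr, maxr, length, last) := st
  let length := length + maxr - minr
  let safe := safe ++ [(last, minr)]
  let dam := dam ++ [(minr, maxr)]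
  let safe := if (PySem.List.pyGetD safe (-1) ((0:Int), (0:Int))).2 ≠ rl
              then safe ++ [(maxr, rl)] else safe
  (length, dam, safe)

-- ===== PORT B =====
-- The Python list used as a stack (append / pop from the end) is kept head-first here:
-- pushing conses, and the unwind's pop order (last pushed first) is the head-first foldl.
def sectorsPush (st : List (Int × Int × Int) × Int × Int × Int) (x : Int × Int) :
    List (Int × Int × Int) × Int × Int × Int :=
  let (stack, prev, lo, hi) := st
  if x.2 ≤ hi then st
  else if x.1 ≤ hi then (stack, prev, lo, x.2)
  else ((prev, lo, hi) :: stack, hi, x.1, x.2)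

def sectorsPop (acc : Int × List (Int × Int) × List (Int × Int)) (f : Int × Int × Int) :
    Int × List (Int × Int) × List (Int × Int) :=
  (acc.1 + (f.2.2 - f.2.1), acc.2.1 ++ [(f.2.1, f.2.2)], acc.2.2 ++ [(f.1, f.2.1)])

def sectors_alt (sec : List (Int × Int)) (rl : Int) : Int × (List (Int × Int)) × (List (Int × Int)) :=
  let c0 := PySem.List.pyGetD sec 0 ((0:Int), (0:Int))   -- sec[0]; Pre_ gives sec ≠ []
  let st := (PySem.List.slice sec (some 1) none).foldl sectorsPush ([], 0, c0.1, c0.2)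
  let (stack, prev, lo, hi) := st
  let sr := if lo ≠ rl then [(hi, rl), (prev, lo)] else [(prev, lo)]
  let u := stack.foldl sectorsPop (hi - lo, [(lo, hi)], sr)
  (u.1, u.2.1.reverse, u.2.2.reverse)   -- [::-1] = List.reverse

-- ===== PRECONDITION & SPEC =====
-- Pre_ excludes only the empty list, on which A raises IndexError at sec[0]
def Pre_sectors (sec : List (Int × Int)) (rl : Int) : Prop := sec ≠ []
instance (sec : List (Int × Int)) (rl : Int) : Decidable (Pre_sectors sec rl) := by unfold Pre_sectors; infer_instance
def pvWitness_sectors : (List (Int × Int)) × Int := ([((1:Int), (3:Int)), ((5:Int), (7:Int))], (10:Int))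

def Spec_sectors (sec : List (Int × Int)) (rl : Int) (out : Int × (List (Int × Int)) × (List (Int × Int))) : Prop := out = sectors_alt sec rl
instance (sec : List (Int × Int)) (rl : Int) (out : Int × (List (Int × Int)) × (List (Int × Int))) : Decidable (Spec_sectors sec rl out) := by unfold Spec_sectors; infer_instance

-- ===== CLAIM (what is proved, stated in full; the proofs are below) =====
def Claim_equal_sectors : Prop := ∀ (sec : List (Int × Int)) (rl : Int), Dom_sectors sec rl → Pre_sectors sec rl → Spec_sectors sec rl (sectors sec rl)

-- ===== LEMMAS AND PROOFS =====

-- unwind of a stack from the empty accumulator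
def unw (st : List (Int × Int × Int)) : Int × List (Int × Int) × List (Int × Int) :=
  st.foldl sectorsPop (0, [], [])

-- the unwind is a homomorphism in the accumulator
theorem unw_shift (st : List (Int × Int × Int)) :
    ∀ (a : Int) (d s : List (Int × Int)),
    st.foldl sectorsPop (a, d, s) = (a + (unw st).1, d ++ (unw st).2.1, s ++ (unw st).2.2) := by
  induction st with
  | nil => intro a d s; simp [unw]
  | cons f st ih =>
    intro a d s
    rw [List.foldl_cons]
    show List.foldl sectorsPop (sectorsPop (a, d, s) f) st = _
    have h0 : unw (f :: st) = ((f.2.2 - f.2.1) + (unw st).1,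
        [(f.2.1, f.2.2)] ++ (unw st).2.1, [(f.1, f.2.1)] ++ (unw st).2.2) := by
      show List.foldl sectorsPop (sectorsPop (0, [], []) f) st = _
      rw [show sectorsPop (0, [], []) f
            = ((0:Int) + (f.2.2 - f.2.1), ([] : List (Int × Int)) ++ [(f.2.1, f.2.2)],
               ([] : List (Int × Int)) ++ [(f.1, f.2.1)]) from rfl]
      simp only [List.nil_append, zero_add]
      rw [ih]
    rw [show sectorsPop (a, d, s) f
          = (a + (f.2.2 - f.2.1), d ++ [(f.2.1, f.2.2)], s ++ [(f.1, f.2.1)]) from rfl]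
    rw [ih, h0]
    refine Prod.ext (by ring) (Prod.ext (by simp) (by simp))

-- what B does after its forward phase, as a function of the phase's state
def finishB (st : List (Int × Int × Int) × Int × Int × Int) (rl : Int) :
    Int × List (Int × Int) × List (Int × Int) :=
  let (stack, prev, lo, hi) := st
  let sr := if lo ≠ rl then [(hi, rl), (prev, lo)] else [(prev, lo)]
  let u := stack.foldl sectorsPop (hi - lo, [(lo, hi)], sr)
  (u.1, u.2.1.reverse, u.2.2.reverse)

-- what A does after its loop, as a function of the loop's state
def finishA (st : List (Int × Int) × List (Int × Int) × Int × Int × Int × Int) (rl : Int) :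
    Int × List (Int × Int) × List (Int × Int) :=
  let (dam, safe, minr, maxr, length, last) := st
  let length := length + maxr - minr
  let safe := safe ++ [(last, minr)]
  let dam := dam ++ [(minr, maxr)]
  let safe := if (PySem.List.pyGetD safe (-1) ((0:Int), (0:Int))).2 ≠ rl
              then safe ++ [(maxr, rl)] else safe
  (length, dam, safe)

-- the two loops, each followed by its own finish, agree whenever A's accumulators
-- are the (reversed) unwind of B's stack
theorem loops_eq (rl : Int) (l : List (Int × Int)) :
    ∀ (stack : List (Int × Int × Int)) (minr maxr last : Int)
      (dam safe : List (Int × Int)) (length : Int),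
    dam = (unw stack).2.1.reverse → safe = (unw stack).2.2.reverse → length = (unw stack).1 →
    finishA (l.foldl sectorsStepA (dam, safe, minr, maxr, length, last)) rl
      = finishB (l.foldl sectorsPush (stack, last, minr, maxr)) rl := by
  induction l with
  | nil =>
    intro stack minr maxr last dam safe length hd hs hl
    subst hd hs hl
    show finishA (_, _, minr, maxr, _, last) rl = finishB (stack, last, minr, maxr) rl
    unfold finishA finishB
    dsimp only
    rw [unw_shift stack (maxr - minr) [(minr, maxr)]
         (if minr ≠ rl then [(maxr, rl), (last, minr)] else [(last, minr)])]
    rw [PySem.List.pyGetD_neg_one_append_singleton]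
    dsimp only
    refine Prod.ext (by ring) (Prod.ext (by simp) ?_)
    by_cases h : minr = rl
    · simp [h]
    · simp [h]
  | cons x l ih =>
    intro stack minr maxr last dam safe length hd hs hl
    rw [List.foldl_cons, List.foldl_cons]
    by_cases h1 : x.2 ≤ maxr
    · rw [show sectorsStepA (dam, safe, minr, maxr, length, last) x
            = (dam, safe, minr, maxr, length, last) by simp [sectorsStepA, h1]]
      rw [show sectorsPush (stack, last, minr, maxr) x
            = (stack, last, minr, maxr) by simp [sectorsPush, h1]]
      exact ih stack minr maxr last dam safe length hd hs hl
    · by_cases h2 : x.1 ≤ maxr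
      · rw [show sectorsStepA (dam, safe, minr, maxr, length, last) x
              = (dam, safe, minr, x.2, length, last) by simp [sectorsStepA, h1, h2]]
        rw [show sectorsPush (stack, last, minr, maxr) x
              = (stack, last, minr, x.2) by simp [sectorsPush, h1, h2]]
        exact ih stack minr x.2 last dam safe length hd hs hl
      · rw [show sectorsStepA (dam, safe, minr, maxr, length, last) x
              = (dam ++ [(minr, maxr)], safe ++ [(last, minr)], x.1, x.2,
                 length + maxr - minr, maxr) by simp [sectorsStepA, h1, h2]]
        rw [show sectorsPush (stack, last, minr, maxr) x
              = ((last, minr, maxr) :: stack, maxr, x.1, x.2) by simp [sectorsPush, h1, h2]]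
        refine ih ((last, minr, maxr) :: stack) x.1 x.2 maxr _ _ _ ?_ ?_ ?_
        · have : unw ((last, minr, maxr) :: stack)
              = ((maxr - minr) + (unw stack).1, [(minr, maxr)] ++ (unw stack).2.1,
                 [(last, minr)] ++ (unw stack).2.2) := by
            show List.foldl sectorsPop (sectorsPop (0, [], []) (last, minr, maxr)) stack = _
            rw [show sectorsPop (0, [], []) (last, minr, maxr)
                  = ((0:Int) + (maxr - minr), ([] : List (Int × Int)) ++ [(minr, maxr)],
                     ([] : List (Int × Int)) ++ [(last, minr)]) from rfl]
            simp only [List.nil_append, zero_add]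
            exact unw_shift stack (maxr - minr) [(minr, maxr)] [(last, minr)]
          rw [this, hd]; simp
        · have : (unw ((last, minr, maxr) :: stack)).2.2
              = [(last, minr)] ++ (unw stack).2.2 := by
            show (List.foldl sectorsPop (sectorsPop (0, [], []) (last, minr, maxr)) stack).2.2 = _
            rw [show sectorsPop (0, [], []) (last, minr, maxr)
                  = ((0:Int) + (maxr - minr), ([] : List (Int × Int)) ++ [(minr, maxr)],
                     ([] : List (Int × Int)) ++ [(last, minr)]) from rfl]
            simp only [List.nil_append, zero_add]
            rw [unw_shift stack (maxr - minr) [(minr, maxr)] [(last, minr)]]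
          rw [this, hs]; simp
        · have : (unw ((last, minr, maxr) :: stack)).1 = (maxr - minr) + (unw stack).1 := by
            show (List.foldl sectorsPop (sectorsPop (0, [], []) (last, minr, maxr)) stack).1 = _
            rw [show sectorsPop (0, [], []) (last, minr, maxr)
                  = ((0:Int) + (maxr - minr), ([] : List (Int × Int)) ++ [(minr, maxr)],
                     ([] : List (Int × Int)) ++ [(last, minr)]) from rfl]
            simp only [List.nil_append, zero_add]
            rw [unw_shift stack (maxr - minr) [(minr, maxr)] [(last, minr)]]
          rw [this, hl]; ring

-- ===== VERDICT (by name: the statement is the Claim_ definition above) =====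
theorem sectors_spec : Claim_equal_sectors := by
  intro sec rl _ hpre
  obtain ⟨x, xs, rfl⟩ : ∃ y ys, sec = y :: ys := by
    cases sec with
    | nil => exact absurd rfl hpre
    | cons y ys => exact ⟨y, ys, rfl⟩
  show sectors (x :: xs) rl = sectors_alt (x :: xs) rl
  unfold sectors sectors_alt
  dsimp only
  rw [PySem.List.foldl_pyRange_pyGetD (x :: xs) ((0:Int), (0:Int)) sectorsStepA _ (by norm_num)]
  rw [PySem.List.slice_from_one]
  simp only [PySem.List.pyGetD_zero_cons, List.tail_cons, Int.toNat_one,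
             List.drop_succ_cons, List.drop_zero]
  have key := loops_eq rl xs [] x.1 x.2 0 [] [] 0 (by simp [unw]) (by simp [unw]) (by simp [unw])
  unfold finishA finishB at key
  exact key
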